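-- pv_equiv track=rewrite | github.com/jairsan/Segmentation-Free_Streaming_Machine_Translation | experiments/iwslt22_deen/models/Transformer_BIG_ds/document-mt/infer_doc_stream_with_offline_model.py | get_max_ngram_repeat
-- ===== SOURCE A (Python) =====
-- def get_max_ngram_repeat(sentence):
--     """ Return the maximum times an n-gram is repeated"""
--     if len(sentence) == 0:
--         return 0
--
--     else:
--         last_ngram = sentence[0]
--         repetitions = 1
--         for ngram in sentence[1:]:
--             if ngram == last_ngram:
--                 repetitions += 1
--
--             else:
--                 last_ngram = ngram
--                 repetitions = 1
--
--         return repetitions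
-- ===== SOURCE B (Python) =====
-- def get_max_ngram_repeat(sentence):
--     """ Return the maximum times an n-gram is repeated"""
--     n = len(sentence)
--     if n == 0:
--         return 0
--     last = sentence[-1]
--     k = n
--     while k > 0 and sentence[k - 1] == last:
--         k -= 1
--     return n - k
-- ===== Notes on version B (the rewrite author's own statement) =====
-- stated objective: alternative
-- what changed: B finds the start index of the trailing run by walking an integer index backwards (while k>0 and sentence[k-1]==last: k-=1) and returns n-k, instead of A's forward element scan that maintains a (last_ngram, repetitions) state and resets the counter on every change.
import Mathlib
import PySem

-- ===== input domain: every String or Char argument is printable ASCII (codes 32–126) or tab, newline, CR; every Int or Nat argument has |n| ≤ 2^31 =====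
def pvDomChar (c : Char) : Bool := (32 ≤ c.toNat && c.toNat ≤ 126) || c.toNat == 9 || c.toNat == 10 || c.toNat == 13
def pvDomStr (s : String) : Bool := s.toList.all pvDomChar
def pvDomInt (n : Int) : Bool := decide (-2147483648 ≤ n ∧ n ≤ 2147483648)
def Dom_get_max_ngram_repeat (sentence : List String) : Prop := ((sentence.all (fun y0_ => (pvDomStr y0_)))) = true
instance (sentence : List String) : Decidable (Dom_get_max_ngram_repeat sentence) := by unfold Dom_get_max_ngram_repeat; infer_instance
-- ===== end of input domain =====

-- B locates the start of the trailing run by decrementing an integer index and returns n - k, instead of A's forward scan with a (last, count) state; objective: alternative (same cost).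


-- ===== PORT A =====
-- the for-loop of A: state (last_ngram, repetitions), one step per element of sentence[1:]
def gmrLoop (last_ngram : String) (repetitions : Int) (rest : List String) : Int :=
  match rest with
  | [] => repetitions
  | ngram :: xs =>
      if ngram == last_ngram then gmrLoop last_ngram (repetitions + 1) xs
      else gmrLoop ngram 1 xs

def get_max_ngram_repeat (sentence : List String) : Int :=
  match sentence with
  | [] => 0
  | h :: t => gmrLoop h 1 t

-- ===== PORT B =====
-- B's while loop: k counts down while sentence[k-1] == last; the index access is
-- total via getD (the loop guard k > 0 keeps the real index in range).
def bLoop (sentence : List String) (last : String) : Nat → Nat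
  | 0 => 0
  | Nat.succ k => if sentence.getD k "" == last then bLoop sentence last k else k + 1

def get_max_ngram_repeat_alt (sentence : List String) : Int :=
  let n := sentence.length
  if n = 0 then 0
  else
    let last := sentence.getD (n - 1) ""
    (n : Int) - (bLoop sentence last n : Int)

-- ===== PRECONDITION & SPEC =====
def Spec_get_max_ngram_repeat (sentence : List String) (out : Int) : Prop := out = get_max_ngram_repeat_alt sentence
instance (sentence : List String) (out : Int) : Decidable (Spec_get_max_ngram_repeat sentence out) := by unfold Spec_get_max_ngram_repeat; infer_instance

-- ===== CLAIM (what is proved, stated in full; the proofs are below) =====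
def Claim_equal_get_max_ngram_repeat : Prop := ∀ (sentence : List String), Dom_get_max_ngram_repeat sentence → Spec_get_max_ngram_repeat sentence (get_max_ngram_repeat sentence)

-- ===== LEMMAS AND PROOFS =====

-- proof-only helper: length of the leading run of c in a list
def runLen (c : String) (l : List String) : Int :=
  match l with
  | [] => 0
  | x :: xs => if x == c then 1 + runLen c xs else 0

theorem runLen_append (c : String) (ys zs : List String) :
    runLen c (ys ++ zs) =
      if ys.all (· == c) then (ys.length : Int) + runLen c zs else runLen c ys := by
  induction ys with
  | nil => simp
  | cons y ys ih =>
      simp only [List.cons_append, runLen, List.all_cons, List.length_cons]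
      by_cases h : (y == c) = true
      · simp only [h, Bool.true_and, ih]
        split_ifs <;> push_cast <;> ring
      · simp [h]

theorem runLen_of_all (c : String) (ys : List String) (h : ys.all (· == c)) :
    runLen c ys = (ys.length : Int) := by
  have h2 := runLen_append c ys []
  simpa [h] using h2

-- proof-only reference value: the trailing run length, written on the reversed list
def trailLen (sentence : List String) : Int :=
  match sentence.reverse with
  | [] => 0
  | last :: rest => 1 + runLen last rest

-- prepending an element does not change the trailing run when xs is not all equal to it
theorem trailLen_cons (l : String) (xs : List String) (hne : xs ≠ [])
    (hall : ¬ (xs.all (· == l)) = true) :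
    trailLen (l :: xs) = trailLen xs := by
  obtain ⟨c, rest, hrev⟩ : ∃ c rest, xs.reverse = c :: rest := by
    cases h2 : xs.reverse with
    | nil => exact absurd (by simpa using h2) hne
    | cons c rest => exact ⟨c, rest, rfl⟩
  have hxs : xs = (c :: rest).reverse := by rw [← hrev]; simp
  have hrl : (l :: xs).reverse = c :: (rest ++ [l]) := by
    simp only [List.reverse_cons]; rw [hrev]; simp
  simp only [trailLen, hrl, hrev, runLen_append]
  by_cases hrest : (rest.all (· == c)) = true
  · have hlc : (l == c) = false := by
      cases hb : (l == c)
      · rfl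
      · exfalso
        apply hall
        have hlceq : l = c := by simpa using hb
        rw [hxs]
        simp only [List.all_reverse, List.all_cons]
        simp [List.all_eq_true, hlceq] at hrest ⊢
        intro a ha; simpa using hrest a ha
    simp [hrest, runLen, hlc, runLen_of_all _ _ hrest]
  · simp [hrest]

-- if all of xs equals l, the whole list (l :: xs) is one run
theorem trailLen_all (l : String) (xs : List String) (hall : (xs.all (· == l)) = true) :
    trailLen (l :: xs) = 1 + (xs.length : Int) := by
  obtain ⟨c, rest, hrev⟩ : ∃ c rest, (l :: xs).reverse = c :: rest := by
    cases h2 : (l :: xs).reverse with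
    | nil => exact absurd h2 (by simp)
    | cons c rest => exact ⟨c, rest, rfl⟩
  have hall' : ((l :: xs).reverse.all (· == l)) = true := by
    simp only [List.all_reverse, List.all_cons]
    simp [hall]
  rw [hrev] at hall'
  simp only [List.all_cons] at hall'
  have hc : c = l := by simpa using (Bool.and_eq_true_iff.mp hall').1
  have hrest : (rest.all (· == l)) = true := (Bool.and_eq_true_iff.mp hall').2
  have hlen : rest.length = xs.length := by
    have h3 := congrArg List.length hrev
    simp at h3; omega
  simp only [trailLen, hrev]
  rw [hc, runLen_of_all _ _ hrest, hlen]

-- A's loop: if the rest is all equal to last_ngram the counter keeps growing,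
-- otherwise the result is the trailing run of (last_ngram :: rest)
theorem gmrLoop_eq (xs : List String) : ∀ (l : String) (r : Int),
    gmrLoop l r xs =
      if xs.all (· == l) then r + (xs.length : Int)
      else trailLen (l :: xs) := by
  induction xs with
  | nil => intro l r; simp [gmrLoop]
  | cons x xs ih =>
      intro l r
      simp only [gmrLoop, List.all_cons]
      by_cases hx : (x == l) = true
      · have hxl : x = l := by simpa using hx
        simp only [hx, if_true, Bool.true_and, ih]
        by_cases hall : (xs.all (· == l)) = true
        · simp only [hall, if_true, List.length_cons]
          push_cast; ring
        · simp only [hall, if_false, Bool.false_eq_true]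
          have hxall : ¬ ((x :: xs).all (· == l)) = true := by
            simp only [List.all_cons]
            simp [hall]
          rw [trailLen_cons l (x :: xs) (by simp) hxall, hxl]
      · have hxf : (x == l) = false := by simpa using hx
        simp only [hxf, Bool.false_and, Bool.false_eq_true, if_false, ih]
        have hxall : ¬ ((x :: xs).all (· == l)) = true := by
          simp [hxf]
        rw [trailLen_cons l (x :: xs) (by simp) hxall]
        by_cases hall : (xs.all (· == x)) = true
        · rw [if_pos hall, trailLen_all x xs hall]
        · rw [if_neg hall]

-- A equals the trailing run length
theorem A_eq_trailLen (sentence : List String) :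
    get_max_ngram_repeat sentence = trailLen sentence := by
  cases sentence with
  | nil => simp [get_max_ngram_repeat, trailLen]
  | cons h t =>
      show gmrLoop h 1 t = _
      rw [gmrLoop_eq]
      by_cases hall : (t.all (· == h)) = true
      · rw [if_pos hall, trailLen_all h t hall]
      · rw [if_neg hall]

-- B's index loop: on the first k elements it strips the trailing run of c
theorem bLoop_eq (xs : List String) (c : String) :
    ∀ k, k ≤ xs.length →
      (bLoop xs c k : Int) = (k : Int) - runLen c (xs.take k).reverse := by
  intro k
  induction k with
  | zero => intro _; simp [bLoop, runLen]
  | succ k ih =>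
      intro hk
      have hklt : k < xs.length := by omega
      have htake : (xs.take (k + 1)).reverse = xs[k] :: (xs.take k).reverse := by
        rw [List.take_add_one]
        simp [List.getElem?_eq_getElem hklt]
      have hget : xs.getD k "" = xs[k] := by
        simp [List.getD, List.getElem?_eq_getElem hklt]
      simp only [bLoop, hget, htake, runLen]
      by_cases hx : (xs[k] == c) = true
      · rw [if_pos hx, if_pos hx, ih (by omega)]
        push_cast; ring
      · rw [if_neg hx, if_neg hx]
        push_cast; ring

-- B equals the trailing run length
theorem B_eq_trailLen (sentence : List String) :
    get_max_ngram_repeat_alt sentence = trailLen sentence := by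
  cases hs : sentence.reverse with
  | nil =>
      have : sentence = [] := by simpa using congrArg List.reverse hs
      subst this; simp [get_max_ngram_repeat_alt, trailLen]
  | cons c rest =>
      have hsen : sentence = (c :: rest).reverse := by rw [← hs]; simp
      have hne : sentence.length ≠ 0 := by rw [hsen]; simp
      have hlast : sentence.getD (sentence.length - 1) "" = c := by
        rw [hsen]
        have : (c :: rest).reverse.length - 1 = rest.length := by simp
        rw [this]
        simp [List.getD, List.reverse_cons]
      have htakeall : sentence.take sentence.length = sentence := List.take_length
      have := bLoop_eq sentence c sentence.length (le_refl _)
      rw [htakeall, hs] at this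
      simp only [get_max_ngram_repeat_alt, trailLen, hs]
      rw [if_neg hne, hlast, this]
      simp only [runLen, BEq.rfl, if_pos]
      ring

-- ===== VERDICT (by name: the statement is the Claim_ definition above) =====
theorem get_max_ngram_repeat_spec : Claim_equal_get_max_ngram_repeat := by
  intro sentence _
  unfold Spec_get_max_ngram_repeat
  rw [A_eq_trailLen, B_eq_trailLen]
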